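-- pv_equiv track=rewrite | github.com/ngnam1104/Legal-RAG | utils/debug_neo4j_relations.py | _dedup_entity_values
-- ===== SOURCE A (Python) =====
-- def _dedup_entity_values(values: list[str]) -> tuple[list[str], dict[str, str]]:
--     """
--     Khu trung entity values -- CHI exact case-insensitive dedup.
--     Tra ve (deduped_list, alias_map) de redirect relations.
--
--     LY DO KHONG dung substring containment:
--     Trong domain phap ly, "Quyet dinh xu phat" va "Quyet dinh xu phat linh vuc y te"
--     la 2 entity KHAC NHAU du cai sau chua cai truoc.
--     Substring merge se gay sai noi dung (linh vuc A bi gan thanh linh vuc B).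
--
--     Chi merge khi 2 gia tri GIONG HET nhau sau khi lowercase.
--     Uu tien giu form viet hoa dau cau (chuan hon).
--     """
--     alias_map: dict[str, str] = {}  # {removed_lower → canonical_value}
--
--     if len(values) <= 1:
--         return values, alias_map
--
--     # Bước 1: Dedup exact case-insensitive
--     seen_lower: dict[str, str] = {}  # lower → best form
--     for v in values:
--         lo = v.lower()
--         if lo not in seen_lower:
--             seen_lower[lo] = v
--         else:
--             existing = seen_lower[lo]
--             # Ưu tiên form viết hoa đầu câu
--             if v[0].isupper() and not existing[0].isupper():
--                 alias_map[existing.lower()] = v   # existing bị thay → redirect sang v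
--                 seen_lower[lo] = v
--             else:
--                 alias_map[v.lower()] = existing   # v bị bỏ → redirect sang existing
--     return list(seen_lower.values()), alias_map
-- ===== SOURCE B (Python) =====
-- def _dedup_entity_values(values: list[str]) -> tuple[list[str], dict[str, str]]:
--     """Case-insensitive exact dedup via a single grouping pass: group originals by
--     lowercase key, then pick each group's canonical form (first member starting
--     with an uppercase letter, else the first member)."""
--     if len(values) <= 1:
--         return values, {}
--
--     groups: dict[str, list[str]] = {}   # lower -> originals, in first-seen order
--     dup_order: list[str] = []           # keys in order of first duplicate occurrence
--     for v in values:
--         lo = v.lower()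
--         if lo in groups:
--             if len(groups[lo]) == 1:
--                 dup_order.append(lo)
--             groups[lo].append(v)
--         else:
--             groups[lo] = [v]
--
--     def canonical(members: list[str]) -> str:
--         for m in members:
--             if m[0].isupper():
--                 return m
--         return members[0]
--
--     deduped = [g[0] if len(g) == 1 else canonical(g) for g in groups.values()]
--     alias_map = {lo: canonical(groups[lo]) for lo in dup_order}
--     return deduped, alias_map
-- ===== Notes on version B (the rewrite author's own statement) =====
-- stated objective: simpler
-- what changed: Replaces A's interleaved best-form/alias bookkeeping with a single grouping pass (lowercase key -> list of originals) followed by one canonical-form pick per group, making explicit that alias_map redirects each merged key to its group's canonical member.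
import Mathlib
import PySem

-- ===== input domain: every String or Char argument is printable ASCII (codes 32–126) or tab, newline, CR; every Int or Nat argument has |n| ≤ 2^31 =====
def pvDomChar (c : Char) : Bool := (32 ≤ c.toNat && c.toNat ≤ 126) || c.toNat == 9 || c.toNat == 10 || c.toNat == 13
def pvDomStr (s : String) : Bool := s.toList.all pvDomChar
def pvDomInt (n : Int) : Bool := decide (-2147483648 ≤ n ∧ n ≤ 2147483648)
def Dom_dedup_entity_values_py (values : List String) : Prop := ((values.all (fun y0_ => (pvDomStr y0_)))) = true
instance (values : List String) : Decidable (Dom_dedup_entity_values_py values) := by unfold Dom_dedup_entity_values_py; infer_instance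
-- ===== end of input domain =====

-- B replaces A's interleaved best-form/alias bookkeeping with a grouping pass plus a
-- per-group canonical pick; objective: simpler decomposition, same O(n) cost.


-- shared helper: v[0].isupper() (Python raises on ""; that case is excluded by Pre_, here we return false)
def pvFirstUpper (s : String) : Bool :=
  match s.toList with
  | [] => false
  | c :: _ => PySem.Chars.isupper c

-- ===== PORT A =====
-- loop body of A's 'for v in values' over the state (alias_map, seen_lower)
def pvStepA (st : PySem.Dict String String × PySem.Dict String String) (v : String) :
    PySem.Dict String String × PySem.Dict String String :=
  let lo := PySem.Str.lower v
  match st.2.get? lo with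
  | none => (st.1, st.2.insert lo v)
  | some existing =>
    if pvFirstUpper v && !pvFirstUpper existing then
      (st.1.insert (PySem.Str.lower existing) v, st.2.insert lo v)
    else
      (st.1.insert (PySem.Str.lower v) existing, st.2)

def dedup_entity_values_py (values : List String) : List String × (List (String × String)) :=
  if values.length ≤ 1 then (values, [])
  else
    let st := values.foldl pvStepA (PySem.Dict.empty, PySem.Dict.empty)
    (st.2.values, st.1.items)

-- ===== PORT B =====
-- canonical(members): first member whose first char is uppercase, else members[0]
def pvCanonFind : List String → Option String
  | [] => none
  | m :: rest => if pvFirstUpper m then some m else pvCanonFind rest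

def pvCanonical (ms : List String) : String :=
  match pvCanonFind ms with
  | some m => m
  | none => ms.headD ""

-- loop body of B's grouping pass over the state (groups, dup_order)
def pvStepB (st : PySem.Dict String (List String) × List String) (v : String) :
    PySem.Dict String (List String) × List String :=
  let lo := PySem.Str.lower v
  match st.1.get? lo with
  | some g => (st.1.insert lo (g ++ [v]), if g.length == 1 then st.2 ++ [lo] else st.2)
  | none => (st.1.insert lo [v], st.2)

def dedup_entity_values_py_alt (values : List String) : List String × (List (String × String)) :=
  if values.length ≤ 1 then (values, [])
  else
    let st := values.foldl pvStepB (PySem.Dict.empty, [])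
    let groups := st.1
    let deduped := groups.items.map (fun p => if p.2.length == 1 then p.2.headD "" else pvCanonical p.2)
    let alias_map := st.2.foldl (fun d lo => d.insert lo (pvCanonical (groups.getD lo []))) PySem.Dict.empty
    (deduped, alias_map.items)

-- ===== PRECONDITION & SPEC =====
-- Pre_ excludes lists in which "" occurs more than once: on those both Pythons raise
-- IndexError (v[0] on an empty string in the duplicate branch), so A returns no value there.
def Pre_dedup_entity_values_py (values : List String) : Prop :=
  PySem.List.count values "" ≤ 1
instance (values : List String) : Decidable (Pre_dedup_entity_values_py values) := by
  unfold Pre_dedup_entity_values_py; infer_instance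

def pvWitness_dedup_entity_values_py : List String := ["Apple", "apple", "banana"]

def Spec_dedup_entity_values_py (values : List String) (out : List String × (List (String × String))) : Prop := out = dedup_entity_values_py_alt values
instance (values : List String) (out : List String × (List (String × String))) : Decidable (Spec_dedup_entity_values_py values out) := by unfold Spec_dedup_entity_values_py; infer_instance

-- ===== CLAIM (what is proved, stated in full; the proofs are below) =====
def Claim_equal_dedup_entity_values_py : Prop := ∀ (values : List String), Dom_dedup_entity_values_py values → Pre_dedup_entity_values_py values → Spec_dedup_entity_values_py values (dedup_entity_values_py values)

-- ===== LEMMAS AND PROOFS =====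

-- structural facts about pvCanonFind
theorem pvCanonFind_eq_some (ms : List String) (m : String) (h : pvCanonFind ms = some m) :
    m ∈ ms ∧ pvFirstUpper m = true := by
  induction ms with
  | nil => simp [pvCanonFind] at h
  | cons x rest ih =>
    by_cases hx : pvFirstUpper x = true
    · simp [pvCanonFind, hx] at h; subst h; exact ⟨by simp, hx⟩
    · simp [pvCanonFind, hx] at h
      obtain ⟨h1, h2⟩ := ih h
      exact ⟨by simp [h1], h2⟩

theorem pvCanonFind_eq_none (ms : List String) (h : pvCanonFind ms = none) :
    ∀ m ∈ ms, pvFirstUpper m = false := by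
  induction ms with
  | nil => simp
  | cons x rest ih =>
    by_cases hx : pvFirstUpper x = true
    · simp [pvCanonFind, hx] at h
    · simp [pvCanonFind, hx] at h
      intro m hm
      rcases List.mem_cons.mp hm with rfl | hm'
      · simpa using hx
      · exact ih h m hm'

theorem pvCanonFind_append (g : List String) (v : String) :
    pvCanonFind (g ++ [v]) =
      match pvCanonFind g with
      | some m => some m
      | none => if pvFirstUpper v then some v else none := by
  induction g with
  | nil => simp [pvCanonFind]
  | cons x rest ih =>
    by_cases hx : pvFirstUpper x = true
    · simp [pvCanonFind, hx]
    · simp [pvCanonFind, hx, ih]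

-- pvCanonical of a singleton is its element
theorem pvCanonical_singleton (m : String) : pvCanonical [m] = m := by
  unfold pvCanonical pvCanonFind
  by_cases hm : pvFirstUpper m = true <;> simp [hm, pvCanonFind]

-- pvCanonical of a nonempty list is a member
theorem pvCanonical_mem (ms : List String) (h : ms ≠ []) : pvCanonical ms ∈ ms := by
  unfold pvCanonical
  cases hf : pvCanonFind ms with
  | some m => exact (pvCanonFind_eq_some ms m hf).1
  | none =>
    rcases ms with _ | ⟨x, rest⟩
    · exact absurd rfl h
    · simp

-- the key step fact: appending one member updates the canonical exactly as A does
theorem pvCanonical_append (g : List String) (v : String) (h : g ≠ []) :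
    pvCanonical (g ++ [v]) =
      if pvFirstUpper v && !pvFirstUpper (pvCanonical g) then v else pvCanonical g := by
  unfold pvCanonical
  rw [pvCanonFind_append]
  cases hf : pvCanonFind g with
  | some m =>
    have hm := (pvCanonFind_eq_some g m hf).2
    simp [hm]
  | none =>
    have hall := pvCanonFind_eq_none g hf
    have hhead : pvFirstUpper (g.head?.getD "") = false := by
      rcases g with _ | ⟨x, rest⟩
      · exact absurd rfl h
      · exact hall x (by simp)
    by_cases hv : pvFirstUpper v = true
    · simp [hv, hhead]
    · simp only [Bool.not_eq_true] at hv
      simp [hv, hhead]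
      rcases g with _ | ⟨x, rest⟩
      · exact absurd rfl h
      · simp

-- the relation the two fold states keep in lockstep
def pvRel (a : PySem.Dict String String × PySem.Dict String String)
    (b : PySem.Dict String (List String) × List String) : Prop :=
  a.2.items = b.1.items.map (fun p => (p.1, pvCanonical p.2)) ∧
  a.1.items = b.2.map (fun lo => (lo, pvCanonical (b.1.getD lo []))) ∧
  b.1.keys.Nodup ∧
  (∀ p ∈ b.1.items, p.2 ≠ [] ∧ ∀ m ∈ p.2, PySem.Str.lower m = p.1) ∧
  b.2.Nodup ∧
  (∀ p ∈ b.1.items, 2 ≤ p.2.length ↔ p.1 ∈ b.2) ∧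
  (∀ lo ∈ b.2, lo ∈ b.1.keys)

-- with Nodup keys, an items member is determined by its key
theorem pvItems_key_det {ν : Type} (d : PySem.Dict String ν) (hnd : d.keys.Nodup)
    (p : String × ν) (hp : p ∈ d.items) (w : ν) (hw : (p.1, w) ∈ d.items) : p.2 = w := by
  have h1 := PySem.Dict.get?_of_mem_items d (by simpa using hp) hnd
  have h2 := PySem.Dict.get?_of_mem_items d hw hnd
  rw [h1] at h2
  exact (Option.some.injEq _ _).mp h2

theorem pvRel_step (a : PySem.Dict String String × PySem.Dict String String)
    (b : PySem.Dict String (List String) × List String) (v : String)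
    (h : pvRel a b) : pvRel (pvStepA a v) (pvStepB b v) := by
  obtain ⟨amap, seen⟩ := a
  obtain ⟨groups, dup⟩ := b
  obtain ⟨h1, h2, h3, h4, h5, h6, h7⟩ := h
  simp only at h1 h2 h3 h4 h5 h6 h7
  set lo := PySem.Str.lower v with hlo
  -- seen and groups have the same keys
  have hkeys : seen.keys = groups.keys := by
    simp only [PySem.Dict.keys, h1, List.map_map]; rfl
  -- alias's keys are exactly dup
  have hakeys : amap.keys = dup := by
    simp only [PySem.Dict.keys, h2, List.map_map]
    show List.map (fun lo => lo) dup = dup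
    simp
  cases hg : groups.get? lo with
  | none =>
    -- fresh lowercase key: both sides append
    have hnotmem : lo ∉ groups.keys := (PySem.Dict.get?_eq_none_iff_not_mem_keys groups lo).mp hg
    have hseen : seen.get? lo = none := by
      rw [PySem.Dict.get?_eq_none_iff_not_mem_keys seen lo, hkeys]; exact hnotmem
    have hsc : seen.contains lo = false := by
      rw [PySem.Dict.contains_eq_isSome_get? seen lo, hseen]; rfl
    have hgc : groups.contains lo = false := by
      rw [PySem.Dict.contains_eq_isSome_get? groups lo, hg]; rfl
    have hlodup : lo ∉ dup := fun hmem => hnotmem (h7 lo hmem)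
    simp only [pvStepA, pvStepB, ← hlo, hg, hseen]
    refine ⟨?_, ?_, ?_, ?_, h5, ?_, ?_⟩
    · simp only [PySem.Dict.items_insert_of_not_contains _ _ hsc,
        PySem.Dict.items_insert_of_not_contains _ _ hgc, List.map_append, h1,
        List.map_cons, List.map_nil, pvCanonical_singleton]
    · rw [h2]
      apply List.map_congr_left
      intro x hx
      have hne : x ≠ lo := fun he => hlodup (he ▸ hx)
      rw [PySem.Dict.getD_insert_of_ne _ _ _ hne]
    · exact PySem.Dict.nodup_keys_insert _ _ _ h3
    · intro p hp
      rcases (PySem.Dict.mem_items_insert _ _ _ _).mp hp with rfl | ⟨hp', _⟩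
      · exact ⟨by simp, by simpa using hlo.symm⟩
      · exact h4 p hp'
    · intro p hp
      rcases (PySem.Dict.mem_items_insert _ _ _ _).mp hp with rfl | ⟨hp', hne⟩
      · simpa using hlodup
      · exact h6 p hp'
    · intro x hx
      exact (PySem.Dict.mem_keys_insert _ _ _ _).mpr (Or.inr (h7 x hx))
  | some g =>
    -- duplicate: A updates the best form and the alias; B appends to the group
    have hmemg : (lo, g) ∈ groups.items := PySem.Dict.mem_items_of_get?_eq_some groups hg
    obtain ⟨hgne, hgmem⟩ := h4 (lo, g) hmemg
    have hcg : pvCanonical g ∈ g := pvCanonical_mem g hgne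
    have hlex : PySem.Str.lower (pvCanonical g) = lo := hgmem _ hcg
    have hseen : seen.get? lo = some (pvCanonical g) := by
      apply PySem.Dict.get?_of_mem_items seen
      · rw [h1]
        exact List.mem_map.mpr ⟨(lo, g), hmemg, rfl⟩
      · rw [hkeys]; exact h3
    have hsc : seen.contains lo = true := by
      rw [PySem.Dict.contains_eq_isSome_get? seen lo, hseen]; rfl
    have hgcon : groups.contains lo = true := by
      rw [PySem.Dict.contains_eq_isSome_get? groups lo, hg]; rfl
    have hdupiff : 2 ≤ g.length ↔ lo ∈ dup := h6 (lo, g) hmemg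
    have hcanapp := pvCanonical_append g v hgne
    simp only [pvStepA, pvStepB, ← hlo, hg, hseen]
    -- the canonical form of the extended group, in A's terms
    by_cases hcond : (pvFirstUpper v && !pvFirstUpper (pvCanonical g)) = true
    case pos =>
      rw [if_pos hcond] at hcanapp ⊢
      rw [hlex]
      refine ⟨?_, ?_, ?_, ?_, ?_, ?_, ?_⟩
      · simp only [PySem.Dict.items_insert_of_contains _ _ hsc,
          PySem.Dict.items_insert_of_contains _ _ hgcon, h1, List.map_map]
        apply List.map_congr_left
        intro p hp
        by_cases hpe : p.1 = lo
        · simp [Function.comp, hpe, hcanapp]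
        · simp [Function.comp, hpe]
      · by_cases hdup : lo ∈ dup
        · have hg2 : ¬ (g.length == 1) = true := by
            have := hdupiff.mpr hdup; simp; omega
          rw [if_neg hg2]
          have hac : amap.contains lo = true := by
            rw [PySem.Dict.contains_iff_mem_keys amap lo, hakeys]; exact hdup
          simp only [PySem.Dict.items_insert_of_contains _ _ hac, h2, List.map_map]
          apply List.map_congr_left
          intro x hx
          by_cases hxe : x = lo
          · subst hxe
            simp [Function.comp, PySem.Dict.getD_insert_self, hcanapp]
          · simp [Function.comp, hxe, PySem.Dict.getD_insert_of_ne _ _ _ hxe]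
        · have hg1 : g.length = 1 := by
            have := hdupiff; have hgl : 1 ≤ g.length := List.length_pos_of_ne_nil hgne
            by_contra hne; exact hdup (this.mp (by omega))
          rw [if_pos (by simp [hg1])]
          have hac : amap.contains lo = false := by
            rw [← Bool.not_eq_true, PySem.Dict.contains_iff_mem_keys amap lo, hakeys]; exact hdup
          simp only [PySem.Dict.items_insert_of_not_contains _ _ hac, h2, List.map_append,
            List.map_cons, List.map_nil, PySem.Dict.getD_insert_self, hcanapp]
          congr 1
          apply List.map_congr_left
          intro x hx
          have hxe : x ≠ lo := fun he => hdup (he ▸ hx)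
          rw [PySem.Dict.getD_insert_of_ne _ _ _ hxe]
      · exact PySem.Dict.nodup_keys_insert _ _ _ h3
      · intro p hp
        rcases (PySem.Dict.mem_items_insert _ _ _ _).mp hp with rfl | ⟨hp', _⟩
        · refine ⟨by simp, ?_⟩
          intro m hm
          rcases List.mem_append.mp hm with hm' | hm'
          · exact hgmem m hm'
          · simp at hm'; subst hm'; exact hlo.symm
        · exact h4 p hp'
      · by_cases hdup : lo ∈ dup
        · have : ¬ (g.length == 1) = true := by have := hdupiff.mpr hdup; simp; omega
          rw [if_neg this]; exact h5
        · have hg1 : g.length = 1 := by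
            have hgl : 1 ≤ g.length := List.length_pos_of_ne_nil hgne
            by_contra hne; exact hdup (hdupiff.mp (by omega))
          rw [if_pos (by simp [hg1])]
          simp [List.nodup_append, h5]
          exact fun a ha hae => hdup (hae ▸ ha)
      · intro p hp
        have hlodup' : lo ∈ (if (g.length == 1) = true then dup ++ [lo] else dup) := by
          split
          · simp
          · rename_i hgl
            have hgl1 : 1 ≤ g.length := List.length_pos_of_ne_nil hgne
            simp at hgl
            exact hdupiff.mp (by omega)
        rcases (PySem.Dict.mem_items_insert _ _ _ _).mp hp with rfl | ⟨hp', hne⟩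
        · constructor
          · intro _; exact hlodup'
          · intro _
            have : 1 ≤ g.length := List.length_pos_of_ne_nil hgne
            simp; omega
        · rw [h6 p hp']
          split
          · simp only [List.mem_append, List.mem_singleton]
            exact ⟨Or.inl, fun hx => hx.resolve_right (by simpa using hne)⟩
          · exact Iff.rfl
      · intro x hx
        apply (PySem.Dict.mem_keys_insert _ _ _ _).mpr
        by_cases hxe : x = lo
        · exact Or.inl hxe
        · right
          apply h7
          revert hx; split
          · intro hx
            rcases List.mem_append.mp hx with hx' | hx'
            · exact hx'
            · simp at hx'; exact absurd hx' hxe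
          · exact id
    case neg =>
      rw [if_neg hcond] at hcanapp ⊢
      refine ⟨?_, ?_, ?_, ?_, ?_, ?_, ?_⟩
      · simp only [PySem.Dict.items_insert_of_contains _ _ hgcon, h1, List.map_map]
        apply List.map_congr_left
        intro p hp
        by_cases hpe : p.1 = lo
        · have hpg : p.2 = g := pvItems_key_det groups h3 p hp g (hpe ▸ hmemg)
          simp [Function.comp, hpe, hcanapp, hpg]
        · simp [Function.comp, hpe]
      · by_cases hdup : lo ∈ dup
        · have hg2 : ¬ (g.length == 1) = true := by
            have := hdupiff.mpr hdup; simp; omega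
          rw [if_neg hg2]
          have hac : amap.contains lo = true := by
            rw [PySem.Dict.contains_iff_mem_keys amap lo, hakeys]; exact hdup
          simp only [PySem.Dict.items_insert_of_contains _ _ hac, h2, List.map_map]
          apply List.map_congr_left
          intro x hx
          by_cases hxe : x = lo
          · subst hxe
            simp [Function.comp, PySem.Dict.getD_insert_self, hcanapp]
          · simp [Function.comp, hxe, PySem.Dict.getD_insert_of_ne _ _ _ hxe]
        · have hg1 : g.length = 1 := by
            have hgl : 1 ≤ g.length := List.length_pos_of_ne_nil hgne
            by_contra hne; exact hdup (hdupiff.mp (by omega))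
          rw [if_pos (by simp [hg1])]
          have hac : amap.contains lo = false := by
            rw [← Bool.not_eq_true, PySem.Dict.contains_iff_mem_keys amap lo, hakeys]; exact hdup
          simp only [PySem.Dict.items_insert_of_not_contains _ _ hac, h2, List.map_append,
            List.map_cons, List.map_nil, PySem.Dict.getD_insert_self, hcanapp]
          congr 1
          apply List.map_congr_left
          intro x hx
          have hxe : x ≠ lo := fun he => hdup (he ▸ hx)
          rw [PySem.Dict.getD_insert_of_ne _ _ _ hxe]
      · exact PySem.Dict.nodup_keys_insert _ _ _ h3
      · intro p hp
        rcases (PySem.Dict.mem_items_insert _ _ _ _).mp hp with rfl | ⟨hp', _⟩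
        · refine ⟨by simp, ?_⟩
          intro m hm
          rcases List.mem_append.mp hm with hm' | hm'
          · exact hgmem m hm'
          · simp at hm'; subst hm'; exact hlo.symm
        · exact h4 p hp'
      · by_cases hdup : lo ∈ dup
        · have : ¬ (g.length == 1) = true := by have := hdupiff.mpr hdup; simp; omega
          rw [if_neg this]; exact h5
        · have hg1 : g.length = 1 := by
            have hgl : 1 ≤ g.length := List.length_pos_of_ne_nil hgne
            by_contra hne; exact hdup (hdupiff.mp (by omega))
          rw [if_pos (by simp [hg1])]
          simp [List.nodup_append, h5]
          exact fun a ha hae => hdup (hae ▸ ha)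
      · intro p hp
        have hlodup' : lo ∈ (if (g.length == 1) = true then dup ++ [lo] else dup) := by
          split
          · simp
          · rename_i hgl
            have hgl1 : 1 ≤ g.length := List.length_pos_of_ne_nil hgne
            simp at hgl
            exact hdupiff.mp (by omega)
        rcases (PySem.Dict.mem_items_insert _ _ _ _).mp hp with rfl | ⟨hp', hne⟩
        · constructor
          · intro _; exact hlodup'
          · intro _
            have : 1 ≤ g.length := List.length_pos_of_ne_nil hgne
            simp; omega
        · rw [h6 p hp']
          split
          · simp only [List.mem_append, List.mem_singleton]
            exact ⟨Or.inl, fun hx => hx.resolve_right (by simpa using hne)⟩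
          · exact Iff.rfl
      · intro x hx
        apply (PySem.Dict.mem_keys_insert _ _ _ _).mpr
        by_cases hxe : x = lo
        · exact Or.inl hxe
        · right
          apply h7
          revert hx; split
          · intro hx
            rcases List.mem_append.mp hx with hx' | hx'
            · exact hx'
            · simp at hx'; exact absurd hx' hxe
          · exact id

theorem pvRel_foldl (values : List String)
    (a : PySem.Dict String String × PySem.Dict String String)
    (b : PySem.Dict String (List String) × List String)
    (h : pvRel a b) : pvRel (values.foldl pvStepA a) (values.foldl pvStepB b) := by
  induction values generalizing a b with
  | nil => exact h
  | cons v rest ih => exact ih _ _ (pvRel_step a b v h)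

-- ===== VERDICT (by name: the statement is the Claim_ definition above) =====
theorem dedup_entity_values_py_spec : Claim_equal_dedup_entity_values_py := by
  intro values _ _
  unfold Spec_dedup_entity_values_py dedup_entity_values_py dedup_entity_values_py_alt
  by_cases hlen : values.length ≤ 1
  · simp [hlen]
  · simp only [if_neg hlen]
    have hrel := pvRel_foldl values (PySem.Dict.empty, PySem.Dict.empty) (PySem.Dict.empty, [])
      (by refine ⟨rfl, rfl, ?_, ?_, ?_, ?_, ?_⟩ <;> simp [PySem.Dict.empty, PySem.Dict.keys])
    set stA := values.foldl pvStepA (PySem.Dict.empty, PySem.Dict.empty) with hstA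
    set stB := values.foldl pvStepB (PySem.Dict.empty, []) with hstB
    obtain ⟨h1, h2, h3, h4, h5, h6, h7⟩ := hrel
    have hout1 : stA.2.values =
        stB.1.items.map (fun p => if p.2.length == 1 then p.2.headD "" else pvCanonical p.2) := by
      simp only [PySem.Dict.values, h1, List.map_map]
      apply List.map_congr_left
      intro p hp
      obtain ⟨hne, _⟩ := h4 p hp
      by_cases hl : p.2.length = 1
      · obtain ⟨m, hm⟩ := List.length_eq_one_iff.mp hl
        simp [Function.comp, hm, pvCanonical_singleton]
      · simp [Function.comp, hl]
    have hfresh := PySem.Dict.items_foldl_insert_fresh stB.2 (fun a => a)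
      (fun a => pvCanonical (stB.1.getD a [])) PySem.Dict.empty
      (fun a _ => by simp) (by simpa using h5)
    simp only [hout1, hfresh, h2]
    simp [PySem.Dict.empty]
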